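-- pv_equiv track=rewrite | github.com/zPedroLuis/load-balancer-and-comments | load_balancer/load_balancer.py | simulate_allocation
-- ===== SOURCE A (Python) =====
-- def simulate_allocation(ttask, umax, users_per_tick):
--     """Simula a alocação de usuários nos servidores tick por tick."""
--     servers = []  # Lista de servidores ativos
--     output = []   # Estado dos servidores em cada tick
--
--     for new_users in users_per_tick:
--         # Atualizar estado dos servidores (remover usuários completados)
--         servers = [(server - 1) for server in servers if server > 1]
--
--         # Adicionar novos usuários
--         for _ in range(new_users):
--             # Tentar adicionar ao último servidor disponível
--             if servers and servers[-1] < umax: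
--                 servers[-1] += 1
--             else:
--                 # Criar novo servidor
--                 servers.append(1)
--
--         # Registrar estado dos servidores
--         output.append(','.join(map(str, servers)) if servers else '0')
--
--     return output
-- ===== SOURCE B (Python) =====
-- def simulate_allocation(ttask, umax, users_per_tick):
--     """Simula a alocação de usuários nos servidores tick por tick."""
--     servers = []
--     output = []
--     cap = max(umax, 1)  # effective capacity of a freshly created server
--     for new_users in users_per_tick:
--         # age servers, dropping the ones that finished
--         servers = [(s - 1) for s in servers if s > 1]
--         n = new_users
--         if n > 0:
--             # top up the last server arithmetically instead of one user at a time
--             if servers: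
--                 r = min(n, max(umax - servers[-1], 0))
--                 servers[-1] += r
--                 n -= r
--             # remaining users fill brand-new servers, cap each, remainder last
--             full, rem = divmod(n, cap)
--             servers.extend([cap] * full)
--             if rem:
--                 servers.append(rem)
--         output.append(','.join(map(str, servers)) if servers else '0')
--     return output
-- ===== Notes on version B (the rewrite author's own statement) =====
-- stated objective: faster
-- what changed: A's inner per-user loop (one list mutation per user) is replaced by per-tick arithmetic: top up the last server with min(n, umax-last), then create n//umax full servers and one remainder server via divmod.
import Mathlib
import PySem

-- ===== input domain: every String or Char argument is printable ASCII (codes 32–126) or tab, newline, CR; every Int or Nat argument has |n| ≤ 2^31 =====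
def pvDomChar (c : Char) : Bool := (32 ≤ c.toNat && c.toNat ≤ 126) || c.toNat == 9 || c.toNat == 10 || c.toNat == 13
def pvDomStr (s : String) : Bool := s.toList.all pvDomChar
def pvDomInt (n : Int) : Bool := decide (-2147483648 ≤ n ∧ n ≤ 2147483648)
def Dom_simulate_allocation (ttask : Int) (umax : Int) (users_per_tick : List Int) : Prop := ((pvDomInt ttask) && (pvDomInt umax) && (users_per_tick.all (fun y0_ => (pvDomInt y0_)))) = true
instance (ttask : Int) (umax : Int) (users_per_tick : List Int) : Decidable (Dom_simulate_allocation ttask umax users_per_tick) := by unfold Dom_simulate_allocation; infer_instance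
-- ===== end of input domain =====

-- B replaces A's one-user-at-a-time inner loop by arithmetic (top up the last
-- server, then create whole new servers by division); objective: faster.

-- ===== PORT A =====
-- one iteration of A's inner `for _ in range(new_users)` body
def stepA (umax : Int) (sv : List Int) : List Int :=
  match sv.getLast? with
  | some l => if l < umax then sv.dropLast ++ [l + 1] else sv ++ [1]
  | none => sv ++ [1]

-- A's inner loop: `for _ in range(new_users): ...`
def simAAdd (umax : Int) (servers : List Int) (new_users : Int) : List Int :=
  (PySem.List.pyRange 0 new_users 1).foldl (fun sv _ => stepA umax sv) servers

-- A's outer-loop body (state = (servers, output))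
def tickA (umax : Int) (st : List Int × List String) (new_users : Int) : List Int × List String :=
  let sv := (st.1.filter (fun s => decide (1 < s))).map (fun s => s - 1)
  let sv := simAAdd umax sv new_users
  (sv, st.2 ++ [if sv.isEmpty then "0" else PySem.Str.join "," (sv.map PySem.Int.toStr)])

def simulate_allocation (ttask : Int) (umax : Int) (users_per_tick : List Int) : List String :=
  (users_per_tick.foldl (tickA umax) ([], [])).2

-- ===== PORT B =====
-- B's per-tick arithmetic allocation: top up the last server, then extend with
-- full servers (`divmod`) and the remainder
def simBAdd (umax : Int) (cap : Int) (servers : List Int) (new_users : Int) : List Int :=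
  if 0 < new_users then
    let p : List Int × Int :=
      match servers.getLast? with
      | some l =>
          let r := min new_users (max (umax - l) 0)
          (servers.dropLast ++ [l + r], new_users - r)
      | none => (servers, new_users)
    let full := PySem.Int.floordiv p.2 cap
    let rem := PySem.Int.mod p.2 cap
    let sv := p.1 ++ List.replicate full.toNat cap
    if rem ≠ 0 then sv ++ [rem] else sv
  else servers

def tickB (umax : Int) (cap : Int) (st : List Int × List String) (new_users : Int) : List Int × List String :=
  let sv := (st.1.filter (fun s => decide (1 < s))).map (fun s => s - 1)
  let sv := simBAdd umax cap sv new_users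
  (sv, st.2 ++ [if sv.isEmpty then "0" else PySem.Str.join "," (sv.map PySem.Int.toStr)])

def simulate_allocation_alt (ttask : Int) (umax : Int) (users_per_tick : List Int) : List String :=
  (users_per_tick.foldl (tickB umax (max umax 1)) ([], [])).2

-- ===== PRECONDITION & SPEC =====
def Spec_simulate_allocation (ttask : Int) (umax : Int) (users_per_tick : List Int) (out : List String) : Prop := out = simulate_allocation_alt ttask umax users_per_tick
instance (ttask : Int) (umax : Int) (users_per_tick : List Int) (out : List String) : Decidable (Spec_simulate_allocation ttask umax users_per_tick out) := by unfold Spec_simulate_allocation; infer_instance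

-- ===== CLAIM (what is proved, stated in full; the proofs are below) =====
def Claim_equal_simulate_allocation : Prop := ∀ (ttask : Int) (umax : Int) (users_per_tick : List Int), Dom_simulate_allocation ttask umax users_per_tick → Spec_simulate_allocation ttask umax users_per_tick (simulate_allocation ttask umax users_per_tick)

-- ===== LEMMAS AND PROOFS =====

-- the effective capacity of a freshly created server, as a Nat
def capN (umax : Int) : Nat := (max umax 1).toNat

-- what k users poured into fresh servers look like
def pack (umax : Int) (k : Nat) : List Int :=
  List.replicate (k / capN umax) ((capN umax : Nat) : Int) ++
    (if k % capN umax = 0 then [] else [((k % capN umax : Nat) : Int)])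

def iterA (umax : Int) : Nat → List Int → List Int
  | 0, sv => sv
  | k+1, sv => iterA umax k (stepA umax sv)

theorem capN_pos (umax : Int) : 1 ≤ capN umax := by unfold capN; omega

theorem capN_cast (umax : Int) : ((capN umax : Nat) : Int) = max umax 1 := by
  unfold capN; omega

theorem sub_one_toNat (umax : Int) : (umax - 1).toNat = capN umax - 1 := by
  unfold capN; omega

theorem pack_zero (umax : Int) : pack umax 0 = [] := by
  simp [pack, Nat.zero_mod, Nat.zero_div]

-- peeling one fresh server off `pack (k+1)`
theorem pack_succ (umax : Int) (k : Nat) :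
    pack umax (k+1) =
      [1 + ((min k (capN umax - 1) : Nat) : Int)] ++ pack umax (k - min k (capN umax - 1)) := by
  have hc := capN_pos umax
  by_cases h : k ≤ capN umax - 1
  · have hmin : min k (capN umax - 1) = k := by omega
    have hk0 : k - k = 0 := by omega
    rw [hmin, hk0, pack_zero]
    by_cases h2 : k + 1 < capN umax
    · simp only [pack, Nat.div_eq_of_lt h2, Nat.mod_eq_of_lt h2, List.replicate_zero,
        List.nil_append]
      rw [if_neg (by omega)]
      simp only [List.append_nil, List.cons.injEq, and_true]
      omega
    · have hkc : k + 1 = capN umax := by omega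
      rw [hkc]
      simp only [pack, Nat.div_self (show 0 < capN umax by omega), Nat.mod_self, if_pos,
        List.append_nil, List.replicate_one]
      simp only [List.cons.injEq, and_true]
      omega
  · have hmin : min k (capN umax - 1) = capN umax - 1 := by omega
    rw [hmin]
    have hm' : k + 1 = (k - (capN umax - 1)) + capN umax := by omega
    rw [hm']
    simp only [pack, Nat.add_div_right _ (show 0 < capN umax by omega), Nat.add_mod_right,
      List.replicate_succ]
    have h1 : (1 : Int) + ((capN umax - 1 : Nat) : Int) = ((capN umax : Nat) : Int) := by omega
    rw [h1]
    simp [List.cons_append]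

-- A's inner loop on a nonempty server list, in closed form
theorem iterA_concat (umax : Int) (k : Nat) :
    ∀ (xs : List Int) (l : Int),
      iterA umax k (xs ++ [l]) =
        xs ++ [l + ((min k (umax - l).toNat : Nat) : Int)]
           ++ pack umax (k - min k (umax - l).toNat) := by
  induction k with
  | zero =>
    intro xs l
    simp [iterA, pack_zero]
  | succ k ih =>
    intro xs l
    show iterA umax k (stepA umax (xs ++ [l])) = _
    rw [stepA]
    simp only [List.getLast?_concat, List.dropLast_concat]
    by_cases hl : l < umax
    · rw [if_pos hl, ih xs (l + 1)]
      have hmin : min (k+1) ((umax - l).toNat) = min k ((umax - (l+1)).toNat) + 1 := by omega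
      rw [hmin]
      have e1 : l + ((min k ((umax - (l+1)).toNat) + 1 : Nat) : Int)
          = l + 1 + ((min k ((umax - (l+1)).toNat) : Nat) : Int) := by push_cast; ring
      have e2 : k + 1 - (min k ((umax - (l+1)).toNat) + 1) = k - min k ((umax - (l+1)).toNat) := by
        omega
      rw [e1, e2]
    · rw [if_neg hl, ih (xs ++ [l]) 1]
      have hmin : min (k+1) ((umax - l).toNat) = 0 := by omega
      rw [hmin]
      rw [sub_one_toNat umax, show (k + 1 - 0 : Nat) = k + 1 from rfl, pack_succ umax k]
      simp [List.append_assoc]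

theorem iterA_nil (umax : Int) (k : Nat) : iterA umax k [] = pack umax k := by
  cases k with
  | zero => simp [iterA, pack_zero]
  | succ k =>
    show iterA umax k (stepA umax []) = _
    have hst : stepA umax [] = [] ++ [(1:Int)] := by rfl
    rw [hst, iterA_concat umax k [] 1]
    rw [sub_one_toNat umax, pack_succ umax k]
    simp

-- A's inner `for _ in range(n)` loop is `iterA` run n.toNat times
theorem simAAdd_eq_iterA (umax : Int) (sv : List Int) (n : Int) :
    simAAdd umax sv n = iterA umax n.toNat sv := by
  have key : ∀ (k : Nat) (a : Int) (sv : List Int),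
      (PySem.List.pyRange a (a + (k : Int)) 1).foldl (fun s _ => stepA umax s) sv
        = iterA umax k sv := by
    intro k
    induction k with
    | zero => intro a sv; simp [PySem.List.pyRange_one_eq_nil, iterA]
    | succ k ih =>
      intro a sv
      rw [PySem.List.pyRange_one_cons (by omega : a < a + ((k+1 : Nat) : Int))]
      rw [List.foldl_cons]
      have : a + ((k+1 : Nat) : Int) = (a + 1) + (k : Int) := by push_cast; ring
      rw [this, ih (a+1) (stepA umax sv)]
      rfl
  by_cases hn : 0 < n
  · have h := key n.toNat 0 sv
    have h0 : (0 : Int) + ((n.toNat : Nat) : Int) = n := by omega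
    rw [h0] at h
    rw [simAAdd]
    exact h
  · have h1 : n.toNat = 0 := by omega
    rw [simAAdd, PySem.List.pyRange_one_eq_nil (by omega), h1]
    rfl

-- B's divmod tail builds exactly `pack`
theorem packB (umax : Int) (m : Nat) :
    (if PySem.Int.mod (m : Int) ((capN umax : Nat) : Int) ≠ 0 then
        List.replicate (PySem.Int.floordiv (m : Int) ((capN umax : Nat) : Int)).toNat ((capN umax : Nat) : Int)
          ++ [PySem.Int.mod (m : Int) ((capN umax : Nat) : Int)]
      else
        List.replicate (PySem.Int.floordiv (m : Int) ((capN umax : Nat) : Int)).toNat ((capN umax : Nat) : Int))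
      = pack umax m := by
  rw [PySem.Int.floordiv_natCast, PySem.Int.mod_natCast, Int.toNat_natCast]
  by_cases h : m % capN umax = 0
  · rw [if_neg (not_ne_iff.mpr (by exact_mod_cast h))]
    simp only [pack]
    rw [if_pos h, List.append_nil]
  · rw [if_pos (by exact_mod_cast h)]
    simp only [pack]
    rw [if_neg h]

-- the core equivalence: B's arithmetic per-tick add equals A's per-user loop
theorem add_eq (umax : Int) (sv : List Int) (n : Int) :
    simBAdd umax (max umax 1) sv n = simAAdd umax sv n := by
  rw [simAAdd_eq_iterA]
  by_cases hn : 0 < n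
  · obtain ⟨k, rfl⟩ : ∃ k : Nat, n = (k : Int) := ⟨n.toNat, by omega⟩
    rw [Int.toNat_natCast]
    rcases sv.eq_nil_or_concat with rfl | ⟨xs, l, rfl⟩
    · rw [iterA_nil, ← packB umax k, simBAdd, if_pos hn]
      simp only [List.getLast?_nil]
      rw [← capN_cast umax]
      split_ifs <;> simp
    · simp only [List.concat_eq_append]
      rw [simBAdd, if_pos hn]
      simp only [List.getLast?_concat, List.dropLast_concat]
      rw [iterA_concat umax k xs l]
      have hr : min ((k : Int)) (max (umax - l) 0) = ((min k (umax - l).toNat : Nat) : Int) := by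
        omega
      have hsub : (k : Int) - ((min k (umax - l).toNat : Nat) : Int)
          = ((k - min k (umax - l).toNat : Nat) : Int) := by omega
      rw [← capN_cast umax]
      simp only [hr, hsub]
      rw [← packB umax (k - min k (umax - l).toNat)]
      split_ifs <;> simp [List.append_assoc]
  · rw [simBAdd, if_neg hn]
    have h1 : n.toNat = 0 := by omega
    rw [h1]
    rfl

theorem tick_eq (umax : Int) : tickB umax (max umax 1) = tickA umax := by
  funext st nu
  simp only [tickA, tickB, add_eq]

-- ===== VERDICT (by name: the statement is the Claim_ definition above) =====
theorem simulate_allocation_spec : Claim_equal_simulate_allocation := by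
  intro ttask umax users_per_tick _
  unfold Spec_simulate_allocation simulate_allocation simulate_allocation_alt
  rw [tick_eq]
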